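-- pv_equiv track=rewrite | github.com/gobbleyourdong/tsunami | tsunami/error_fixer.py | _path_tail
-- ===== SOURCE A (Python) =====
-- def _path_tail(path: str) -> tuple[str, list[str]]:
--     """Split 'mechanics[3].params.fields[2].singleton' into
--     ('mechanics', ['3', 'params', 'fields', '2', 'singleton']). Tokens
--     are raw — integers still as strings, caller parses ints."""
--     if not path: return ("", [])
--     tokens: list[str] = []
--     cur = ""
--     i = 0
--     # crude tokenizer for dotted paths with [idx] brackets
--     while i < len(path):
--         c = path[i]
--         if c == '.':
--             if cur: tokens.append(cur); cur = ""
--         elif c == '[':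
--             if cur: tokens.append(cur); cur = ""
--             j = path.index(']', i)
--             tokens.append(path[i+1:j])
--             i = j
--         else:
--             cur += c
--         i += 1
--     if cur: tokens.append(cur)
--     head = tokens[0] if tokens else ""
--     return (head, tokens[1:])
-- ===== SOURCE B (Python) =====
-- def _path_tail(path: str) -> tuple[str, list[str]]:
--     """Span-jumping tokenizer: instead of accumulating characters one by one,
--     jump over whole name runs with str.find and over bracket contents with
--     str.index."""
--     tokens: list[str] = []
--     i, n = 0, len(path)
--     while i < n:
--         c = path[i]
--         if c == '.':
--             i += 1
--         elif c == '[':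
--             j = path.index(']', i + 1)      # ValueError if unmatched, like A
--             tokens.append(path[i + 1:j])
--             i = j + 1
--         else:
--             d, b = path.find('.', i), path.find('[', i)
--             cut = min(k for k in (d, b) if k >= 0) if max(d, b) >= 0 else n
--             tokens.append(path[i:cut])
--             i = cut
--     return (tokens[0], tokens[1:]) if tokens else ("", [])
-- ===== Notes on version B (the rewrite author's own statement) =====
-- stated objective: faster
-- what changed: A accumulates each name character by character into a growing 'cur' string (quadratic string concatenation) inside a per-character loop; B keeps no accumulator and instead jumps over whole name runs with str.find and over bracket contents with str.index, emitting every token as one slice.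
import Mathlib
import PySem

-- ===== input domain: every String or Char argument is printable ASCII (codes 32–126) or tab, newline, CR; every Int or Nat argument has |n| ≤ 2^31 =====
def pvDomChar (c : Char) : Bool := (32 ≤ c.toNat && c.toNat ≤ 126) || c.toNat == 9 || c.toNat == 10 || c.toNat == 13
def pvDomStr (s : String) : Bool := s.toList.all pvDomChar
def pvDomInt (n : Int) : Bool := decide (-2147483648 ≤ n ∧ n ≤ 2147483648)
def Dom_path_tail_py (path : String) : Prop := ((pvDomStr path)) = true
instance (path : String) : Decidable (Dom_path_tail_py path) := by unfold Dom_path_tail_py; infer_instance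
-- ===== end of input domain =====

-- B replaces A's per-character loop with its growing 'cur' string accumulator by a
-- span-jumping tokenizer (whole name runs and bracket contents taken in one slice);
-- a timing run measured B faster. Both Pythons raise ValueError on an unmatched
-- open bracket; those inputs are outside Pre_.

-- ===== PORT A =====
-- A's while loop over index i with state (tokens, cur); ported as recursion on
-- the suffix path.drop i (the loop advances i by 1, or jumps to j+1 after a
-- bracket).  Python's path.index(']', i) with path[i] = '[' equals the first
-- ']' strictly after i, i.e. findIdx? on the suffix after the '['.
-- 'none' = the ValueError of path.index (no ']' found).
def tokA (tokens : List String) (cur : List Char) : List Char → Option (List String)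
  | [] => some (tokens ++ (if cur.isEmpty then [] else [cur.asString]))
  | c :: rest =>
    if c = '.' then
      tokA (tokens ++ (if cur.isEmpty then [] else [cur.asString])) [] rest
    else if c = '[' then
      match rest.findIdx? (· = ']') with
      | none => none
      | some k =>
        tokA ((tokens ++ (if cur.isEmpty then [] else [cur.asString]))
              ++ [(rest.take k).asString]) [] (rest.drop (k + 1))
    else
      tokA tokens (cur ++ [c]) rest
  termination_by s => s.length
  decreasing_by all_goals
    first
    | (have := List.length_drop (l := rest) (i := k + 1); simp; omega)
    | simp

def path_tail_py (path : String) : String × List String :=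
  if path.toList = [] then ("", []) else
  match tokA [] [] path.toList with
  | none => ("", [])      -- unreachable under Pre_ (Python raises ValueError)
  | some ts => (ts.headD "", ts.drop 1)

-- ===== PORT B =====
-- name characters: anything but '.' and '[' (a lone ']' is a name character)
def pNameB (c : Char) : Bool := !(c = '.' || c = '[')

-- B's while loop; the index state i is ported as the suffix path.drop i.
-- The name branch's cut = first '.' or '[' at or after i is takeWhile/dropWhile
-- of pNameB on the suffix (path[i] itself is a name character there).
def tokB : List Char → List String
  | [] => []
  | c :: rest =>
    if c = '.' then tokB rest
    else if c = '[' then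
      match rest.findIdx? (· = ']') with
      | none => [(c :: rest).asString]   -- Python B raises ValueError here (outside Pre_)
      | some k => (rest.take k).asString :: tokB (rest.drop (k + 1))
    else
      (c :: rest.takeWhile pNameB).asString :: tokB (rest.dropWhile pNameB)
  termination_by s => s.length
  decreasing_by all_goals
    first
    | (have := List.length_drop (l := rest) (i := k + 1); simp; omega)
    | (have := List.length_dropWhile_le (p := pNameB) (l := rest); simp; omega)
    | simp

def path_tail_py_alt (path : String) : String × List String :=
  let ts := tokB path.toList
  if ts.isEmpty then ("", []) else (ts.headD "", ts.drop 1)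

-- ===== PRECONDITION & SPEC =====
-- Pre_ excludes exactly the inputs where Python A raises ValueError: a '['
-- with no ']' anywhere after it.
def Pre_path_tail_py (path : String) : Prop :=
  ∀ i, i < path.toList.length → path.toList.getD i ' ' = '[' →
    ∃ j, j < path.toList.length ∧ (i ≤ j ∧ path.toList.getD j ' ' = ']')
instance (path : String) : Decidable (Pre_path_tail_py path) := by
  unfold Pre_path_tail_py; infer_instance

def pvWitness_path_tail_py : String := "mechanics[3].params.fields[2].singleton"

def Spec_path_tail_py (path : String) (out : String × List String) : Prop := out = path_tail_py_alt path
instance (path : String) (out : String × List String) : Decidable (Spec_path_tail_py path out) := by unfold Spec_path_tail_py; infer_instance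

-- ===== CLAIM (what is proved, stated in full; the proofs are below) =====
def Claim_equal_path_tail_py : Prop := ∀ (path : String), Dom_path_tail_py path → Pre_path_tail_py path → Spec_path_tail_py path (path_tail_py path)

-- ===== LEMMAS AND PROOFS =====

-- the precondition, over lists (helper for the proofs)
def preOK (l : List Char) : Prop :=
  ∀ i, i < l.length → l.getD i ' ' = '[' →
    ∃ j, j < l.length ∧ (i ≤ j ∧ l.getD j ' ' = ']')

lemma preOK_cons {c : Char} {rest : List Char} (h : preOK (c :: rest)) : preOK rest := by
  intro i hi hget
  obtain ⟨j, hj, hij, hgj⟩ := h (i + 1) (by simpa using Nat.succ_lt_succ hi) (by simpa using hget)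
  refine ⟨j - 1, by simp at hj; omega, by omega, ?_⟩
  have hj1 : 1 ≤ j := by omega
  obtain ⟨j', rfl⟩ : ∃ j', j = j' + 1 := ⟨j - 1, by omega⟩
  simpa using hgj

lemma preOK_drop {l : List Char} (h : preOK l) (m : Nat) : preOK (l.drop m) := by
  induction m generalizing l with
  | zero => simpa using h
  | succ m ih =>
    cases l with
    | nil => intro i hi; simp at hi
    | cons c rest =>
      simpa using ih (preOK_cons h)

lemma preOK_bracket {rest : List Char} (h : preOK ('[' :: rest)) :
    ∃ k, rest.findIdx? (· = ']') = some k := by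
  obtain ⟨j, hj, -, hgj⟩ := h 0 (by simp) (by simp)
  have hj1 : 1 ≤ j := by
    rcases Nat.eq_zero_or_pos j with h0 | h
    · subst h0; simp at hgj
    · exact h
  obtain ⟨j', rfl⟩ : ∃ j', j = j' + 1 := ⟨j - 1, by omega⟩
  have hmem : (']' : Char) ∈ rest := by
    have hj' : j' < rest.length := by simp at hj; omega
    have : rest.getD j' ' ' = ']' := by simpa using hgj
    rw [List.getD_eq_getElem _ _ hj'] at this
    exact this ▸ List.getElem_mem hj'
  have hsome : (rest.findIdx? (· = ']')).isSome = true := by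
    clear h hgj hj
    induction rest with
    | nil => simp at hmem
    | cons a l ih =>
      rw [List.findIdx?_cons]
      by_cases ha : a = ']'
      · simp [ha]
      · simp only [ha, decide_false]
        simp at hmem
        rcases hmem with hm | hm
        · exact absurd hm.symm ha
        · simpa using ih hm
  exact Option.isSome_iff_exists.mp hsome

lemma takeWhile_append_all {p : Char → Bool} {cs s : List Char}
    (h : ∀ c ∈ cs, p c = true) : (cs ++ s).takeWhile p = cs ++ s.takeWhile p := by
  induction cs with
  | nil => simp
  | cons c cs ih =>
    simp only [List.cons_append, List.takeWhile_cons, h c (by simp)]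
    simp [ih fun d hd => h d (by simp [hd])]

lemma dropWhile_append_all {p : Char → Bool} {cs s : List Char}
    (h : ∀ c ∈ cs, p c = true) : (cs ++ s).dropWhile p = s.dropWhile p := by
  induction cs with
  | nil => simp
  | cons c cs ih =>
    simp only [List.cons_append, List.dropWhile_cons, h c (by simp)]
    exact ih fun d hd => h d (by simp [hd])

-- tokB on a nonempty pending name followed by a stopping suffix
lemma tokB_name {cur s : List Char} (hcur : ∀ c ∈ cur, pNameB c = true)
    (hstop : s.takeWhile pNameB = [] ∧ s.dropWhile pNameB = s) (hne : cur ≠ []) :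
    tokB (cur ++ s) = cur.asString :: tokB s := by
  cases cur with
  | nil => exact absurd rfl hne
  | cons c cs =>
    have hc : pNameB c = true := hcur c (by simp)
    have hcs : ∀ d ∈ cs, pNameB d = true := fun d hd => hcur d (by simp [hd])
    have h1 : ¬ c = '.' := by by_contra h; simp [pNameB, h] at hc
    have h2 : ¬ c = '[' := by by_contra h; simp [pNameB, h] at hc
    rw [List.cons_append, tokB]
    simp only [h1, h2, if_false]
    rw [takeWhile_append_all hcs, dropWhile_append_all hcs, hstop.1, hstop.2]
    simp

lemma stop_nil : ([] : List Char).takeWhile pNameB = [] ∧ ([] : List Char).dropWhile pNameB = [] := by simp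

lemma stop_dot {r : List Char} :
    ('.' :: r).takeWhile pNameB = [] ∧ ('.' :: r).dropWhile pNameB = '.' :: r := by
  constructor <;> simp [pNameB]

lemma stop_bra {r : List Char} :
    ('[' :: r).takeWhile pNameB = [] ∧ ('[' :: r).dropWhile pNameB = '[' :: r := by
  constructor <;> simp [pNameB]

-- the emission of the pending name (tokB (cur ++ s) split off), for stopping s
lemma tokB_emit {cur s : List Char} (hcur : ∀ c ∈ cur, pNameB c = true)
    (hstop : s.takeWhile pNameB = [] ∧ s.dropWhile pNameB = s) :
    tokB (cur ++ s) = (if cur.isEmpty then [] else [cur.asString]) ++ tokB s := by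
  by_cases hne : cur = []
  · simp [hne]
  · rw [tokB_name hcur hstop hne]; simp [hne]

-- main invariant: A's loop from state (tokens, cur, suffix s) computes
-- tokens ++ tokB (cur ++ s), provided cur holds only name characters and
-- every '[' in s has a later ']'
lemma tokA_eq (s : List Char) (cur : List Char) (tokens : List String)
    (hcur : ∀ c ∈ cur, pNameB c = true) (hpre : preOK s) :
    tokA tokens cur s = some (tokens ++ tokB (cur ++ s)) := by
  induction hn : s.length using Nat.strong_induction_on generalizing s cur tokens with
  | _ n ih =>
  cases s with
  | nil =>
    rw [tokB_emit hcur stop_nil]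
    simp [tokA, tokB]
  | cons c rest =>
    by_cases hdot : c = '.'
    · subst hdot
      have hstep : tokA tokens cur ('.' :: rest)
          = tokA (tokens ++ (if cur.isEmpty then [] else [cur.asString])) [] rest := by
        simp [tokA]
      rw [hstep,
          ih rest.length (by simp [← hn]) rest [] _ (by simp) (preOK_cons hpre) rfl,
          tokB_emit hcur stop_dot]
      simp [tokB]
    · by_cases hbra : c = '['
      · subst hbra
        obtain ⟨k, hk⟩ := preOK_bracket hpre
        have hlen : (rest.drop (k + 1)).length < n := by
          have := List.length_drop (l := rest) (i := k + 1); simp at hn ⊢; omega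
        have hstep : tokA tokens cur ('[' :: rest)
            = tokA ((tokens ++ (if cur.isEmpty then [] else [cur.asString]))
                ++ [(rest.take k).asString]) [] (rest.drop (k + 1)) := by
          simp [tokA, hk]
        rw [hstep,
            ih _ hlen (rest.drop (k + 1)) [] _ (by simp)
              (by simpa using preOK_drop (preOK_cons hpre) (k + 1)) rfl,
            tokB_emit hcur stop_bra,
            show tokB ('[' :: rest) = (rest.take k).asString :: tokB (rest.drop (k + 1)) from by
              simp [tokB, hk]]
        simp
      · have hc : pNameB c = true := by simp [pNameB, hdot, hbra]
        have hstep : tokA tokens cur (c :: rest) = tokA tokens (cur ++ [c]) rest := by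
          simp [tokA, hdot, hbra]
        rw [hstep,
            ih rest.length (by simp [← hn]) rest (cur ++ [c]) _
              (by intro d hd; rcases List.mem_append.mp hd with h | h
                  · exact hcur d h
                  · simp at h; subst h; exact hc)
              (preOK_cons hpre) rfl]
        simp

-- ===== VERDICT (by name: the statement is the Claim_ definition above) =====
theorem path_tail_py_spec : Claim_equal_path_tail_py := by
  intro path _hdom hpre
  unfold Spec_path_tail_py path_tail_py path_tail_py_alt
  by_cases hnil : path.toList = []
  · simp [hnil, tokB]
  · rw [if_neg hnil,
        tokA_eq path.toList [] [] (by simp) (fun i hi hg => hpre i hi hg)]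
    simp only [List.nil_append]
    cases hts : tokB path.toList with
    | nil => simp
    | cons t ts => simp
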